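-- pv_equiv track=rewrite | github.com/jyang32/Northern_Ireland_Education_Text | scripts/utils.py | check_chunk_has_url_content
-- ===== SOURCE A (Python) =====
-- def check_chunk_has_url_content(chunk_text: str, url_contents_dict: dict) -> bool:
--     """
--     Check if a chunk contains URL content by looking for URL markers.
--
--     Args:
--         chunk_text: The text chunk to check
--         url_contents_dict: Dictionary of URL contents
--
--     Returns:
--         True if chunk contains URL content, False otherwise
--     """
--     # Look for URL content markers in the chunk (both raw content and AI summaries)
--     url_markers = [
--         "--- URL Content",
--         "--- AI SUMMARY",
--         "[AI-GENERATED SUMMARY FROM KNOWLEDGE BASE]",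
--         "[AI-GENERATED SUMMARY FROM LIVE CONTENT]"
--     ]
--
--     for url in url_contents_dict.keys():
--         for marker in url_markers:
--             if marker in chunk_text and url in chunk_text:
--                 return True
--     return False
-- ===== SOURCE B (Python) =====
-- _URL_MARKERS = [
--     "--- URL Content",
--     "--- AI SUMMARY",
--     "[AI-GENERATED SUMMARY FROM KNOWLEDGE BASE]",
--     "[AI-GENERATED SUMMARY FROM LIVE CONTENT]",
-- ]
--
--
-- def _any_substring(candidates, text):
--     """Early-exit scan: does some string in `candidates` occur in `text`?"""
--     for c in candidates:
--         if c in text: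
--             return True
--     return False
--
--
-- def check_chunk_has_url_content(chunk_text: str, url_contents_dict: dict) -> bool:
--     """Chunk has URL content iff some fixed marker occurs in it AND some URL key occurs in it."""
--     if _any_substring(_URL_MARKERS, chunk_text):
--         return _any_substring(list(url_contents_dict.keys()), chunk_text)
--     return False
-- ===== Notes on version B (the rewrite author's own statement) =====
-- stated objective: simpler
-- what changed: Replaces the doubly-nested for-loop over (url, marker) pairs by two staged passes of one shared recursive early-exit substring scan: first over the four fixed markers, then (only if a marker was found) over the dict keys; this hoists the url-independent marker test out of the per-key loop.
import Mathlib
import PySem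

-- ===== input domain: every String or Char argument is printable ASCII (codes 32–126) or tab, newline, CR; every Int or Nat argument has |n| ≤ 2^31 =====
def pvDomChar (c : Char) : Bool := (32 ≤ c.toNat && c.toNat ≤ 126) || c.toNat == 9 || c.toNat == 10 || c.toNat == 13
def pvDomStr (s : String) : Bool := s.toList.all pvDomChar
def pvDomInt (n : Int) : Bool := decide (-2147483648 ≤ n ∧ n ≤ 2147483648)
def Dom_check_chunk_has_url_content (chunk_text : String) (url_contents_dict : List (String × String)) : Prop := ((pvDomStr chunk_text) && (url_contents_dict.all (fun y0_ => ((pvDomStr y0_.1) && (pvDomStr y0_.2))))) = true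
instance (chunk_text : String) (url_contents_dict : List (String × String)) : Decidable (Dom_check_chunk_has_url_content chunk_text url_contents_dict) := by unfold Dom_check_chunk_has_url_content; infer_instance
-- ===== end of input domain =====

-- B replaces A's nested marker×key loop by two staged passes of one shared recursive
-- early-exit substring scan (markers first; keys only if a marker was found): simpler decomposition.


-- ===== PORT A =====
def check_chunk_has_url_content (chunk_text : String) (url_contents_dict : List (String × String)) : Bool :=
  let url_markers := ["--- URL Content", "--- AI SUMMARY",
    "[AI-GENERATED SUMMARY FROM KNOWLEDGE BASE]", "[AI-GENERATED SUMMARY FROM LIVE CONTENT]"]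
  -- nested 'for url: for marker: if …: return True' = short-circuit any over keys, any over markers
  url_contents_dict.any (fun kv =>
    url_markers.any (fun marker =>
      PySem.Str.isIn marker chunk_text && PySem.Str.isIn kv.1 chunk_text))

-- ===== PORT B =====
-- early-exit scan shared by both passes (Source B's _any_substring)
def pvAnySubstring (candidates : List String) (text : String) : Bool :=
  match candidates with
  | [] => false
  | c :: rest => if PySem.Str.isIn c text then true else pvAnySubstring rest text

def check_chunk_has_url_content_alt (chunk_text : String) (url_contents_dict : List (String × String)) : Bool :=
  if pvAnySubstring ["--- URL Content", "--- AI SUMMARY",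
      "[AI-GENERATED SUMMARY FROM KNOWLEDGE BASE]", "[AI-GENERATED SUMMARY FROM LIVE CONTENT]"]
      chunk_text then
    pvAnySubstring (url_contents_dict.map Prod.fst) chunk_text
  else
    false

-- ===== PRECONDITION & SPEC =====
def Spec_check_chunk_has_url_content (chunk_text : String) (url_contents_dict : List (String × String)) (out : Bool) : Prop := out = check_chunk_has_url_content_alt chunk_text url_contents_dict
instance (chunk_text : String) (url_contents_dict : List (String × String)) (out : Bool) : Decidable (Spec_check_chunk_has_url_content chunk_text url_contents_dict out) := by unfold Spec_check_chunk_has_url_content; infer_instance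

-- ===== CLAIM (what is proved, stated in full; the proofs are below) =====
def Claim_equal_check_chunk_has_url_content : Prop := ∀ (chunk_text : String) (url_contents_dict : List (String × String)), Dom_check_chunk_has_url_content chunk_text url_contents_dict → Spec_check_chunk_has_url_content chunk_text url_contents_dict (check_chunk_has_url_content chunk_text url_contents_dict)

-- ===== LEMMAS AND PROOFS =====
theorem pvAnySubstring_eq_any (candidates : List String) (text : String) :
    pvAnySubstring candidates text = candidates.any (fun c => PySem.Str.isIn c text) := by
  induction candidates with
  | nil => rfl
  | cons c rest ih =>
    by_cases h : PySem.Str.isIn c text = true <;> simp [pvAnySubstring, ih, h]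

-- ===== VERDICT (by name: the statement is the Claim_ definition above) =====
theorem check_chunk_has_url_content_spec : Claim_equal_check_chunk_has_url_content := by
  intro chunk_text url_contents_dict _
  unfold Spec_check_chunk_has_url_content
  rw [Bool.eq_iff_iff]
  simp only [check_chunk_has_url_content, check_chunk_has_url_content_alt, pvAnySubstring_eq_any]
  split_ifs with h <;>
    simp only [List.any_map, Function.comp, List.any_eq_true, Bool.and_eq_true,
      not_exists] at h ⊢ <;>
    tauto
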